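-- pv_equiv track=rewrite | github.com/mattiaaroo/EserciziPython | Lezione7/Lezione7.py | rimuovi_elementi
-- ===== SOURCE A (Python) =====
-- def rimuovi_elementi(lista: list[int], da_rimuovere: dict[int, int]) -> list[int]:
--     for n, count in da_rimuovere.items():
--         contatore = 0
--         while contatore < count:
--             if n in lista:
--                 lista.remove(n)
--                 contatore += 1
--             else:
--                 break
--     return lista
-- ===== SOURCE B (Python) =====
-- def rimuovi_elementi(lista: list[int], da_rimuovere: dict[int, int]) -> list[int]:
--     remaining = dict(da_rimuovere)
--     out = []
--     for x in lista:
--         if remaining.get(x, 0) > 0: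
--             remaining[x] = remaining[x] - 1
--         else:
--             out.append(x)
--     lista[:] = out
--     return lista
-- ===== Notes on version B (the rewrite author's own statement) =====
-- stated objective: faster
-- what changed: Replaces the per-key repeated membership-test-and-remove loop (each remove scans the list) by one left-to-right pass over the list with a mutable remaining-count dict, decrementing budgets and rebuilding the list.
import Mathlib
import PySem

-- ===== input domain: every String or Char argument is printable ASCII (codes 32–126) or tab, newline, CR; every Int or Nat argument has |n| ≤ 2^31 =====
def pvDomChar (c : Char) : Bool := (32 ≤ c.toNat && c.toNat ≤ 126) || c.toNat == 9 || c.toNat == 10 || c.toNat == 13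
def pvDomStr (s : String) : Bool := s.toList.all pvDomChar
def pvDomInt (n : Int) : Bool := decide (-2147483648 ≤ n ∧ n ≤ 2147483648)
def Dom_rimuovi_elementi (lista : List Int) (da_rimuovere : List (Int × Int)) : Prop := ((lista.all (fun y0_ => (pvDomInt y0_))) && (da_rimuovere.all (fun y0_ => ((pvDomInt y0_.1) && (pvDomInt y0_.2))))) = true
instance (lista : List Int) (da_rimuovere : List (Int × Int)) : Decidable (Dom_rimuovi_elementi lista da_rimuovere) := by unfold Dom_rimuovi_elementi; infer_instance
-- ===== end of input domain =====

-- B replaces A's per-key remove loop by one pass over the list with a remaining-count dict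
-- (faster). Both A and B mutate `lista` in place in Python; the theorems here are about the
-- returned value (which equals the final list contents in both).

-- ===== PORT A =====
-- the inner `while contatore < count: if n in lista: lista.remove(n); contatore += 1 else: break`
def pvWhileA (n count : Int) (lista : List Int) (contatore : Int) : List Int :=
  if contatore < count then
    match PySem.List.remove? lista n with
    | some l' => pvWhileA n count l' (contatore + 1)
    | none => lista
  else lista
termination_by (count - contatore).toNat
decreasing_by omega

def rimuovi_elementi (lista : List Int) (da_rimuovere : List (Int × Int)) : List Int :=
  -- `for n, count in da_rimuovere.items():` — the dict the Python receives, decoded from the pairs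
  ((PySem.Dict.ofList da_rimuovere).items).foldl (fun l p => pvWhileA p.1 p.2 l 0) lista

-- ===== PORT B =====
def rimuovi_elementi_alt (lista : List Int) (da_rimuovere : List (Int × Int)) : List Int :=
  (lista.foldl
    (fun (st : PySem.Dict Int Int × List Int) x =>
      if 0 < st.1.getD x 0 then (st.1.insert x (st.1.getD x 0 - 1), st.2)
      else (st.1, st.2 ++ [x]))
    (PySem.Dict.ofList da_rimuovere, [])).2

-- ===== PRECONDITION & SPEC =====
def Spec_rimuovi_elementi (lista : List Int) (da_rimuovere : List (Int × Int)) (out : List Int) : Prop := out = rimuovi_elementi_alt lista da_rimuovere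
instance (lista : List Int) (da_rimuovere : List (Int × Int)) (out : List Int) : Decidable (Spec_rimuovi_elementi lista da_rimuovere out) := by unfold Spec_rimuovi_elementi; infer_instance

-- ===== CLAIM (what is proved, stated in full; the proofs are below) =====
def Claim_equal_rimuovi_elementi : Prop := ∀ (lista : List Int) (da_rimuovere : List (Int × Int)), Dom_rimuovi_elementi lista da_rimuovere → Spec_rimuovi_elementi lista da_rimuovere (rimuovi_elementi lista da_rimuovere)

-- ===== LEMMAS AND PROOFS =====

-- single-key budgeted pass: drop occurrences of n while the budget b is positive
def passOne (n b : Int) : List Int → List Int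
  | [] => []
  | x :: xs => if x = n ∧ 0 < b then passOne n (b - 1) xs else x :: passOne n b xs

-- combined pass with a per-value budget function (the abstract form of B's loop)
def specPass (f : Int → Int) : List Int → List Int
  | [] => []
  | x :: xs =>
      if 0 < f x then specPass (fun y => if y = x then f x - 1 else f y) xs
      else x :: specPass f xs

-- first-match lookup with default 0 on an association list
def lookupD : List (Int × Int) → Int → Int
  | [], _ => 0
  | (k, v) :: rest, x => if x = k then v else lookupD rest x

lemma passOne_nonpos (n b : Int) (l : List Int) (hb : b ≤ 0) : passOne n b l = l := by
  induction l with
  | nil => rfl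
  | cons x xs ih =>
      have : ¬ (x = n ∧ 0 < b) := by omega
      simp [passOne, this, ih]

lemma passOne_not_mem (n b : Int) (l : List Int) (hn : n ∉ l) : passOne n b l = l := by
  induction l generalizing b with
  | nil => rfl
  | cons x xs ih =>
      simp only [List.mem_cons, not_or] at hn
      have : ¬ (x = n ∧ 0 < b) := fun h => hn.1 h.1.symm
      simp [passOne, this, ih b hn.2]

lemma passOne_erase (n b : Int) (l : List Int) (hm : n ∈ l) (hb : 0 < b) :
    passOne n b l = passOne n (b - 1) (l.erase n) := by
  induction l with
  | nil => cases hm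
  | cons x xs ih =>
      by_cases hx : x = n
      · subst hx
        simp [passOne, hb, List.erase_cons_head]
      · have hm' : n ∈ xs := by
          rcases List.mem_cons.mp hm with h | h
          · exact absurd h.symm hx
          · exact h
        rw [List.erase_cons_tail (by simpa using hx)]
        simp [passOne, hx, ih hm']

lemma whileA_eq_passOne (l : List Int) (n c cnt : Int) :
    pvWhileA n c l cnt = passOne n (c - cnt) l := by
  induction hL : l.length using Nat.strong_induction_on generalizing l cnt with
  | _ len ih =>
    unfold pvWhileA
    by_cases hc : cnt < c
    · simp only [hc, if_true]
      by_cases hm : n ∈ l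
      · rw [PySem.List.remove?_eq_some_erase l n hm]
        have hlen : (l.erase n).length < len := by
          rw [← hL, List.length_erase_of_mem hm]
          have : 0 < l.length := List.length_pos_of_mem hm
          omega
        simp only []
        rw [ih _ hlen (l.erase n) (cnt + 1) rfl]
        rw [passOne_erase n (c - cnt) l hm (by omega)]
        congr 1; omega
      · rw [(PySem.List.remove?_eq_none_iff l n).mpr hm]
        exact (passOne_not_mem n (c - cnt) l hm).symm
    · simp only [hc, if_false]
      exact (passOne_nonpos n (c - cnt) l (by omega)).symm

lemma specPass_nonpos (f : Int → Int) (l : List Int) (hf : ∀ x, f x ≤ 0) : specPass f l = l := by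
  induction l with
  | nil => rfl
  | cons x xs ih =>
      have : ¬ 0 < f x := by have := hf x; omega
      simp [specPass, this, ih]

-- the commuting lemma: one more single-key pass folds into the budget function
lemma specPass_passOne (n c : Int) (f : Int → Int) (l : List Int) (hfn : f n ≤ 0) :
    specPass f (passOne n c l) = specPass (fun y => if y = n then c else f y) l := by
  induction l generalizing c f with
  | nil => rfl
  | cons x xs ih =>
      by_cases hx : x = n
      · subst hx
        by_cases hc : 0 < c
        · have h1 : passOne x c (x :: xs) = passOne x (c - 1) xs := by simp [passOne, hc]
          rw [h1, ih (c - 1) f hfn]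
          have h2 : specPass (fun y => if y = x then c else f y) (x :: xs)
              = specPass (fun y => if y = x then c - 1 else f y) xs := by
            simp only [specPass]
            rw [if_pos (by simpa using hc)]
            congr 1; funext y; by_cases hy : y = x <;> simp [hy]
          rw [h2]
        · have h1 : passOne x c (x :: xs) = x :: passOne x c xs := by simp [passOne, hc]
          rw [h1]
          have hfx : ¬ 0 < f x := by omega
          have hL : specPass f (x :: passOne x c xs) = x :: specPass f (passOne x c xs) := by
            simp [specPass, hfx]
          have hR : specPass (fun y => if y = x then c else f y) (x :: xs)
              = x :: specPass (fun y => if y = x then c else f y) xs := by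
            simp only [specPass]
            rw [if_neg (by simpa using hc)]
          rw [hL, hR, ih c f hfn]
      · have hx' : ¬ n = x := fun h => hx h.symm
        have h1 : passOne n c (x :: xs) = x :: passOne n c xs := by simp [passOne, hx]
        rw [h1]
        by_cases hfx : 0 < f x
        · have hL : specPass f (x :: passOne n c xs)
              = specPass (fun y => if y = x then f x - 1 else f y) (passOne n c xs) := by
            simp [specPass, hfx]
          have hR : specPass (fun y => if y = n then c else f y) (x :: xs)
              = specPass (fun y => if y = x then f x - 1 else if y = n then c else f y) xs := by
            simp only [specPass]
            rw [if_pos (by simpa [hx, hx'] using hfx)]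
            congr 1; funext y
            by_cases hy1 : y = x
            · simp [hy1, hx]
            · by_cases hy2 : y = n <;> simp [hy1, hy2, hx']
          rw [hL, hR, ih c _ (by simp [hx']; exact hfn)]
          congr 1; funext y
          by_cases hy1 : y = x
          · simp [hy1, hx]
          · by_cases hy2 : y = n <;> simp [hy1, hy2, hx']
        · have hL : specPass f (x :: passOne n c xs) = x :: specPass f (passOne n c xs) := by
            simp [specPass, hfx]
          have hR : specPass (fun y => if y = n then c else f y) (x :: xs)
              = x :: specPass (fun y => if y = n then c else f y) xs := by
            simp only [specPass]
            rw [if_neg (by simpa [hx, hx'] using hfx)]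
          rw [hL, hR, ih c f hfn]

lemma lookupD_eq_zero_of_not_mem (rest : List (Int × Int)) (n : Int)
    (h : n ∉ rest.map Prod.fst) : lookupD rest n = 0 := by
  induction rest with
  | nil => rfl
  | cons q qs ih =>
      obtain ⟨k, v⟩ := q
      simp only [List.map_cons, List.mem_cons, not_or] at h
      simp [lookupD, h.1, ih h.2]

-- A's fold over distinct keys is the combined pass with the first-match lookup
lemma foldA_eq_specPass (items : List (Int × Int)) (l : List Int)
    (hnd : (items.map Prod.fst).Nodup) :
    items.foldl (fun l p => passOne p.1 p.2 l) l = specPass (lookupD items) l := by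
  induction items generalizing l with
  | nil => exact (specPass_nonpos _ l (fun _ => le_refl 0)).symm
  | cons p rest ih =>
      obtain ⟨n, c⟩ := p
      simp only [List.map_cons, List.nodup_cons] at hnd
      rw [List.foldl_cons, ih (passOne n c l) hnd.2]
      rw [specPass_passOne n c (lookupD rest) l
        (by rw [lookupD_eq_zero_of_not_mem rest n hnd.1])]
      rfl

-- B's fold with a Dict state is the combined pass with the dict's lookup
lemma foldB_eq_specPass (l : List Int) (d : PySem.Dict Int Int) (acc : List Int) :
    (l.foldl
      (fun (st : PySem.Dict Int Int × List Int) x =>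
        if 0 < st.1.getD x 0 then (st.1.insert x (st.1.getD x 0 - 1), st.2)
        else (st.1, st.2 ++ [x]))
      (d, acc)).2 = acc ++ specPass (fun x => d.getD x 0) l := by
  induction l generalizing d acc with
  | nil => simp [specPass]
  | cons x xs ih =>
      by_cases hx : 0 < d.getD x 0
      · rw [List.foldl_cons]
        simp only [hx, if_true]
        rw [ih]
        have : (fun y => (d.insert x (d.getD x 0 - 1)).getD y 0)
             = (fun y => if y = x then d.getD x 0 - 1 else d.getD y 0) := by
          funext y; exact PySem.Dict.getD_insert d x y (d.getD x 0 - 1) 0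
        rw [this]
        simp [specPass, hx]
      · rw [List.foldl_cons]
        simp only [hx, if_false]
        rw [ih]
        simp [specPass, hx]

-- the dict's getD is the first-match lookup on its items
lemma lookupD_eq_getD (items : List (Int × Int)) (x : Int) :
    lookupD items x = (PySem.Dict.mk items).getD x 0 := by
  induction items with
  | nil => simp [lookupD, PySem.Dict.getD_eq_get?_getD]; rfl
  | cons p rest ih =>
      obtain ⟨k, v⟩ := p
      rw [PySem.Dict.getD_eq_get?_getD, PySem.Dict.get?_mk_cons]
      by_cases hk : x = k
      · simp [lookupD, hk]
      · have hbeq : (k == x) = false := by simpa using fun h => hk h.symm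
        simp only [lookupD, hk, if_false, hbeq, Bool.false_eq_true]
        rw [ih, PySem.Dict.getD_eq_get?_getD]

-- ===== VERDICT (by name: the statement is the Claim_ definition above) =====
theorem rimuovi_elementi_spec : Claim_equal_rimuovi_elementi := by
  intro lista da_rimuovere _
  unfold Spec_rimuovi_elementi rimuovi_elementi rimuovi_elementi_alt
  set d := PySem.Dict.ofList da_rimuovere with hd
  have hnd : (d.items.map Prod.fst).Nodup := by
    have := PySem.Dict.nodup_keys_ofList da_rimuovere
    simpa [PySem.Dict.keys, hd] using this
  have hstep : (fun (l : List Int) (p : Int × Int) => pvWhileA p.1 p.2 l 0)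
      = (fun (l : List Int) (p : Int × Int) => passOne p.1 p.2 l) := by
    funext l p
    rw [whileA_eq_passOne l p.1 p.2 0]
    norm_num
  rw [hstep, foldA_eq_specPass d.items lista hnd, foldB_eq_specPass lista d []]
  have hf : lookupD d.items = fun x => d.getD x 0 := by
    funext x
    rw [lookupD_eq_getD d.items x]
  rw [hf]
  simp
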